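-- pv_equiv track=rewrite | github.com/alberto-guzman/CS-08-Python | PythonCode/gradebook.py | max_grade
-- ===== SOURCE A (Python) =====
-- def max_grade(book):
--     max_grade = 0
--     for row in book:
--         if row[1] > max_grade:
--             max_grade = row[1]
--     students = []
--     for row in book:
--         if row[1] == max_grade:
--             students.append(row[0])
--     return students
-- ===== SOURCE B (Python) =====
-- def max_grade(book):
--     best = 0
--     students = []
--     for name, grade in book:
--         if grade > best:
--             best = grade
--             students = [name]
--         elif grade == best:
--             students.append(name)
--     return students
-- ===== Notes on version B (the rewrite author's own statement) =====
-- stated objective: alternative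
-- what changed: Fuses A's two passes (compute max, then re-scan for matching names) into one pass that maintains the running max together with the collected names, resetting the list when a strictly larger grade appears.
import Mathlib
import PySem

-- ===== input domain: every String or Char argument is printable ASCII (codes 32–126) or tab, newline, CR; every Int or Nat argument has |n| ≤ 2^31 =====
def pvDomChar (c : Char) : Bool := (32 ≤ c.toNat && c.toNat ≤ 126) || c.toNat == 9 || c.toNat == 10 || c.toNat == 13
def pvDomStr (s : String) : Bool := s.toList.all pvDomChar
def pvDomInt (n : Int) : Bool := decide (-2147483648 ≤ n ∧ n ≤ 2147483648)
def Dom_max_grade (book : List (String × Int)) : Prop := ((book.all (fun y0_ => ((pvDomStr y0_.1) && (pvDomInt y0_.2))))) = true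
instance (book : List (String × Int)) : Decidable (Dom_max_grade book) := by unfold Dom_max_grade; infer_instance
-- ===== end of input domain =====

-- B fuses A's two passes into one pass maintaining the running max and the collected names together.


-- ===== PORT A =====
-- pass 1: find the max grade (seeded at 0); pass 2: collect names whose grade equals it
def max_grade (book : List (String × Int)) : List String :=
  let m := book.foldl (fun mg row => if row.2 > mg then row.2 else mg) 0
  book.foldl (fun students row => if row.2 = m then students ++ [row.1] else students) []

-- ===== PORT B =====
-- single pass: running best (seeded at 0) and the names collected so far; a strictly larger grade resets the list
def max_grade_alt (book : List (String × Int)) : List String :=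
  (book.foldl
    (fun st row =>
      if row.2 > st.1 then (row.2, [row.1])
      else if row.2 = st.1 then (st.1, st.2 ++ [row.1])
      else st)
    ((0 : Int), ([] : List String))).2

-- ===== PRECONDITION & SPEC =====
def Spec_max_grade (book : List (String × Int)) (out : List String) : Prop := out = max_grade_alt book
instance (book : List (String × Int)) (out : List String) : Decidable (Spec_max_grade book out) := by unfold Spec_max_grade; infer_instance

-- ===== CLAIM (what is proved, stated in full; the proofs are below) =====
def Claim_equal_max_grade : Prop := ∀ (book : List (String × Int)), Dom_max_grade book → Spec_max_grade book (max_grade book)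

-- ===== LEMMAS AND PROOFS =====

/-- A's first pass: running max seeded at `b`. -/
def pvMx (b : Int) (l : List (String × Int)) : Int :=
  l.foldl (fun mg row => if row.2 > mg then row.2 else mg) b

/-- names of entries whose grade equals `M`, in order. -/
def pvNames (M : Int) (l : List (String × Int)) : List String :=
  (l.filter (fun r => decide (r.2 = M))).map Prod.fst

theorem pvMx_cons (b : Int) (n : String) (g : Int) (t : List (String × Int)) :
    pvMx b ((n, g) :: t) = pvMx (if g > b then g else b) t := rfl

theorem le_pvMx (l : List (String × Int)) (b : Int) : b ≤ pvMx b l := by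
  induction l generalizing b with
  | nil => simp [pvMx]
  | cons r t ih =>
    obtain ⟨n, g⟩ := r
    rw [pvMx_cons]
    by_cases h : g > b
    · rw [if_pos h]; have := ih g; omega
    · rw [if_neg h]; exact ih b

theorem pvNames_cons (M : Int) (n : String) (g : Int) (t : List (String × Int)) :
    pvNames M ((n, g) :: t) = (if g = M then [n] else []) ++ pvNames M t := by
  simp only [pvNames, List.filter_cons]
  by_cases h : g = M <;> simp [h]

/-- B's loop invariant. -/
theorem pvLoop (l : List (String × Int)) (b : Int) (s : List String) :
    l.foldl
      (fun st row =>
        if row.2 > st.1 then (row.2, [row.1])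
        else if row.2 = st.1 then (st.1, st.2 ++ [row.1])
        else st) (b, s)
    = (pvMx b l, if pvMx b l = b then s ++ pvNames b l else pvNames (pvMx b l) l) := by
  induction l generalizing b s with
  | nil => simp [pvMx, pvNames]
  | cons r t ih =>
    obtain ⟨n, g⟩ := r
    rw [List.foldl_cons, pvMx_cons]
    by_cases h1 : g > b
    · simp only [if_pos h1]
      rw [ih]
      have hle : g ≤ pvMx g t := le_pvMx t g
      have hne : pvMx g t ≠ b := by omega
      rw [if_neg hne, pvNames_cons]
      by_cases h2 : pvMx g t = g
      · rw [if_pos h2]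
        simp only [h2]
        simp
      · rw [if_neg h2]
        have : ¬ g = pvMx g t := fun h => h2 h.symm
        simp [this]
    · simp only [if_neg h1]
      by_cases h2 : g = b
      · simp only [if_pos h2]
        rw [ih]
        by_cases h3 : pvMx b t = b
        · rw [if_pos h3, if_pos h3, pvNames_cons, if_pos h2]
          simp
        · rw [if_neg h3, if_neg h3, pvNames_cons]
          have hle : b ≤ pvMx b t := le_pvMx t b
          have : ¬ g = pvMx b t := by omega
          simp [this]
      · simp only [if_neg h2]
        rw [ih]
        by_cases h3 : pvMx b t = b
        · rw [if_pos h3, if_pos h3, pvNames_cons, if_neg h2]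
          simp
        · rw [if_neg h3, if_neg h3, pvNames_cons]
          have hle : b ≤ pvMx b t := le_pvMx t b
          have : ¬ g = pvMx b t := by omega
          simp [this]

/-- A's result in closed form. -/
theorem pvA (book : List (String × Int)) : max_grade book = pvNames (pvMx 0 book) book := by
  show book.foldl (fun students row => if row.2 = pvMx 0 book then students ++ [row.1] else students) [] = _
  rw [PySem.List.foldl_append_ite (p := fun r => r.2 = pvMx 0 book) (f := Prod.fst) (l := book) (acc := [])]
  simp [pvNames]

-- ===== VERDICT (by name: the statement is the Claim_ definition above) =====
theorem max_grade_spec : Claim_equal_max_grade := by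
  intro book _
  unfold Spec_max_grade max_grade_alt
  rw [pvA, pvLoop]
  by_cases h : pvMx 0 book = 0 <;> simp [h]
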